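-- pv_equiv track=rewrite | github.com/adap/flower | baselines/flwr_baselines/publications/leaf/femnist/nist_sampler.py | _create_samples_division_list
-- ===== SOURCE A (Python) =====
-- def _create_samples_division_list(n_samples, n_groups, keep_remainder=True):
--     group_size = n_samples // n_groups
--     n_samples_in_full_groups = n_groups * group_size
--     samples_division_list = []
--     for i in range(n_groups):
--         samples_division_list.extend([i] * group_size)
--     if n_samples_in_full_groups != n_samples:
--         # add remainder only if it is needed == remainder is not equal zero
--         remainder = n_samples - n_samples_in_full_groups
--         samples_division_list.extend([n_groups] * remainder)
--     return samples_division_list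
-- ===== SOURCE B (Python) =====
-- def _create_samples_division_list(n_samples, n_groups, keep_remainder=True):
--     group_size, remainder = divmod(n_samples, n_groups)
--     if group_size <= 0:
--         # no full group fits: only remainder samples (possibly none)
--         return [n_groups] * remainder
--     # derive each sample's group label directly from its index
--     return [min(j // group_size, n_groups) for j in range(n_samples)]
-- ===== Notes on version B (the rewrite author's own statement) =====
-- stated objective: alternative
-- what changed: B computes each sample's group label directly from its index with one floor division (a per-sample comprehension with a min() cap), instead of A's block-by-block list extension over the groups; the degenerate case group_size <= 0 returns the remainder block directly.
import Mathlib
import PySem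

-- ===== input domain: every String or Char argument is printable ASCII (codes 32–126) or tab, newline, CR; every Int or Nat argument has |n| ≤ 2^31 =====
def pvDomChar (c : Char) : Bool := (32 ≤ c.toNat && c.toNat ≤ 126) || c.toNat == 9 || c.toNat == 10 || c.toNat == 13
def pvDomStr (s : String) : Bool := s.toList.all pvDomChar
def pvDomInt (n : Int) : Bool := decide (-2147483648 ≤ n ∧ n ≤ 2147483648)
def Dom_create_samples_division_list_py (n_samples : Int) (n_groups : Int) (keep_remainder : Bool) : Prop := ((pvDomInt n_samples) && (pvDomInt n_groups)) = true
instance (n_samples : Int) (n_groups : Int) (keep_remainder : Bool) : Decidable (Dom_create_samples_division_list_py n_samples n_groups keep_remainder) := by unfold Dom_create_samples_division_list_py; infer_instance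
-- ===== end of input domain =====

-- B derives each sample's group label from its own index by one division (per-sample
-- comprehension) instead of A's block-by-block extension over groups; objective: alternative.

-- ===== PORT A =====
def create_samples_division_list_py (n_samples : Int) (n_groups : Int) (keep_remainder : Bool) : List Int :=
  let group_size := PySem.Int.floordiv n_samples n_groups
  let n_samples_in_full_groups := n_groups * group_size
  -- for i in range(n_groups): list.extend([i] * group_size)  ([i]*k is empty for k ≤ 0)
  let samples_division_list :=
    (PySem.List.pyRange 0 n_groups 1).foldl
      (fun acc i => acc ++ List.replicate group_size.toNat i) ([] : List Int)
  if n_samples_in_full_groups ≠ n_samples then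
    samples_division_list ++ List.replicate (n_samples - n_samples_in_full_groups).toNat n_groups
  else samples_division_list

-- ===== PORT B =====
def create_samples_division_list_py_alt (n_samples : Int) (n_groups : Int) (keep_remainder : Bool) : List Int :=
  let gr := PySem.Int.floordiv n_samples n_groups
  let rem := PySem.Int.mod n_samples n_groups
  if gr ≤ 0 then List.replicate rem.toNat n_groups
  else (PySem.List.pyRange 0 n_samples 1).map (fun j => min (PySem.Int.floordiv j gr) n_groups)

-- ===== PRECONDITION & SPEC =====
-- Pre_ excludes exactly n_groups = 0, where Python A raises ZeroDivisionError.
def Pre_create_samples_division_list_py (n_samples : Int) (n_groups : Int) (keep_remainder : Bool) : Prop := n_groups ≠ 0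
instance (n_samples : Int) (n_groups : Int) (keep_remainder : Bool) : Decidable (Pre_create_samples_division_list_py n_samples n_groups keep_remainder) := by unfold Pre_create_samples_division_list_py; infer_instance
def pvWitness_create_samples_division_list_py : Int × Int × Bool := (7, 3, true)

def Spec_create_samples_division_list_py (n_samples : Int) (n_groups : Int) (keep_remainder : Bool) (out : List Int) : Prop := out = create_samples_division_list_py_alt n_samples n_groups keep_remainder
instance (n_samples : Int) (n_groups : Int) (keep_remainder : Bool) (out : List Int) : Decidable (Spec_create_samples_division_list_py n_samples n_groups keep_remainder out) := by unfold Spec_create_samples_division_list_py; infer_instance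

-- ===== CLAIM (what is proved, stated in full; the proofs are below) =====
def Claim_equal_create_samples_division_list_py : Prop := ∀ (n_samples : Int) (n_groups : Int) (keep_remainder : Bool), Dom_create_samples_division_list_py n_samples n_groups keep_remainder → Pre_create_samples_division_list_py n_samples n_groups keep_remainder → Spec_create_samples_division_list_py n_samples n_groups keep_remainder (create_samples_division_list_py n_samples n_groups keep_remainder)

-- ===== LEMMAS AND PROOFS =====

lemma block_eq_replicate (q m : Int) (hq : 0 < q) :
    (PySem.List.pyRange (m*q) (m*q+q) 1).map (fun j => PySem.Int.floordiv j q)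
      = List.replicate q.toNat m := by
  have hlen : ((PySem.List.pyRange (m*q) (m*q+q) 1).map
      (fun j => PySem.Int.floordiv j q)).length = q.toNat := by
    simp [PySem.List.length_pyRange_one]
  rw [← hlen]
  apply List.eq_replicate_of_mem
  intro b hb
  simp only [List.mem_map] at hb
  obtain ⟨j, hj, rfl⟩ := hb
  rw [PySem.List.mem_pyRange_one] at hj
  rw [PySem.Int.floordiv_eq_iff_of_pos hq]
  constructor
  · exact hj.1
  · nlinarith [hj.2]

lemma blocks_eq (q : Int) (hq : 0 < q) : ∀ m : Nat,
    (PySem.List.pyRange 0 (m : Int) 1).flatMap (fun i => List.replicate q.toNat i)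
      = (PySem.List.pyRange 0 ((m : Int)*q) 1).map (fun j => PySem.Int.floordiv j q) := by
  intro m
  induction m with
  | zero => simp [PySem.List.pyRange_one_eq_nil]
  | succ m ih =>
    have h1 : PySem.List.pyRange 0 ((m+1 : Nat) : Int) 1
        = PySem.List.pyRange 0 (m : Int) 1 ++ [(m : Int)] := by
      push_cast
      exact PySem.List.pyRange_one_succ_right (by positivity)
    have h2 : PySem.List.pyRange 0 (((m+1 : Nat) : Int)*q) 1
        = PySem.List.pyRange 0 ((m : Int)*q) 1
          ++ PySem.List.pyRange ((m : Int)*q) ((m : Int)*q + q) 1 := by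
      push_cast
      rw [show ((m : Int)+1)*q = (m : Int)*q + q by ring]
      exact PySem.List.pyRange_one_append 0 ((m : Int)*q) ((m : Int)*q + q)
        (by positivity) (by linarith)
    rw [h1, h2, List.flatMap_append, List.map_append, ih,
        block_eq_replicate q (m : Int) hq]
    simp

lemma tail_eq_replicate (q g n : Int) (hq : 0 < q) :
    (PySem.List.pyRange (g*q) n 1).map (fun j => min (PySem.Int.floordiv j q) g)
      = List.replicate (n - g*q).toNat g := by
  have hlen : ((PySem.List.pyRange (g*q) n 1).map
      (fun j => min (PySem.Int.floordiv j q) g)).length = (n - g*q).toNat := by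
    simp [PySem.List.length_pyRange_one]
  rw [← hlen]
  apply List.eq_replicate_of_mem
  intro b hb
  simp only [List.mem_map] at hb
  obtain ⟨j, hj, rfl⟩ := hb
  rw [PySem.List.mem_pyRange_one] at hj
  have : g ≤ PySem.Int.floordiv j q := by
    rw [PySem.Int.le_floordiv_iff_mul_le hq]
    exact hj.1
  omega


lemma ports_agree (n g : Int) (kr : Bool) (hg : g ≠ 0) :
    create_samples_division_list_py n g kr = create_samples_division_list_py_alt n g kr := by
  simp only [create_samples_division_list_py, create_samples_division_list_py_alt]
  set q := PySem.Int.floordiv n g with hqdef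
  set r := PySem.Int.mod n g with hrdef
  have hnr : q * g + r = n := PySem.Int.floordiv_mul_add_mod n g
  rcases lt_or_gt_of_ne hg with hgneg | hgpos
  · -- g < 0 : both sides are empty
    have hrle : r ≤ 0 := (PySem.Int.mod_neg_bounds n hgneg).2
    rw [PySem.List.pyRange_one_eq_nil (le_of_lt hgneg)]
    simp only [List.foldl_nil]
    have hrval : n - g * q = r := by linarith
    have hAempty : (n - g * q).toNat = 0 := by omega
    rcases le_or_gt q 0 with hq | hq
    · rw [if_pos hq]
      have hr0 : r.toNat = 0 := by omega
      rw [hr0, List.replicate_zero, hAempty, List.replicate_zero]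
      split_ifs <;> simp
    · rw [if_neg (not_le.mpr hq)]
      have hn0 : n ≤ 0 := by nlinarith
      rw [PySem.List.pyRange_one_eq_nil hn0, List.map_nil, hAempty, List.replicate_zero]
      split_ifs <;> simp
  · -- g > 0
    have hr0 : 0 ≤ r := PySem.Int.mod_nonneg n hgpos
    have hrlt : r < g := PySem.Int.mod_lt n hgpos
    have hfull : n - g * q = r := by linarith
    rw [PySem.List.foldl_append_eq_flatMap, List.nil_append, hfull]
    rcases le_or_gt q 0 with hq | hq
    · -- no full group fits
      rw [if_pos hq]
      have hq0 : q.toNat = 0 := by omega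
      simp only [hq0]
      split_ifs with h1
      · simp
      · have : r = 0 := by omega
        simp [this]
    · rw [if_neg (not_le.mpr hq)]
      have hsplit : PySem.List.pyRange 0 n 1
          = PySem.List.pyRange 0 (g*q) 1 ++ PySem.List.pyRange (g*q) n 1 :=
        PySem.List.pyRange_one_append 0 (g*q) n (by positivity) (by linarith)
      rw [hsplit, List.map_append]
      have hhead : (PySem.List.pyRange 0 (g*q) 1).map
            (fun j => min (PySem.Int.floordiv j q) g)
          = (PySem.List.pyRange 0 (g*q) 1).map (fun j => PySem.Int.floordiv j q) := by
        apply List.map_congr_left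
        intro j hj
        rw [PySem.List.mem_pyRange_one] at hj
        have : PySem.Int.floordiv j q < g := by
          rw [PySem.Int.floordiv_lt_iff_lt_mul hq]
          exact hj.2
        omega
      rw [hhead, tail_eq_replicate q g n hq, hfull]
      have hblocks : (PySem.List.pyRange 0 g 1).flatMap (fun i => List.replicate q.toNat i)
          = (PySem.List.pyRange 0 (g*q) 1).map (fun j => PySem.Int.floordiv j q) := by
        obtain ⟨m, hm⟩ : ∃ m : Nat, g = (m : Int) := ⟨g.toNat, by omega⟩
        rw [hm]
        exact blocks_eq q hq m
      rw [hblocks]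
      split_ifs with h1
      · rfl
      · have : r = 0 := by omega
        simp [this]

-- ===== VERDICT (by name: the statement is the Claim_ definition above) =====
theorem create_samples_division_list_py_spec : Claim_equal_create_samples_division_list_py := by
  intro n g kr _ hg
  unfold Spec_create_samples_division_list_py
  exact ports_agree n g kr hg
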